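-- pv_equiv track=rewrite | github.com/edt-yxz-zzd/python3_src | nn_ns/graph/dgraph_ordered_partition.py | end_of_cell2lens
-- ===== SOURCE A (Python) =====
-- def end_of_cell2lens(end_of_cell):
--     begin = 0
--     N = len(end_of_cell)
--     assert N
--
--     ls = []
--     while begin < N:
--         end = 1 + end_of_cell.index(True, begin)
--         L = end - begin
--         assert L
--         ls.append(L)
--
--         begin = end
--     assert end == N
--
--     assert ls
--     assert sum(ls) == N
--     return ls
-- ===== SOURCE B (Python) =====
-- def end_of_cell2lens(end_of_cell):
--     # One forward pass: each True flag closes the current cell; its length is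
--     # the distance from the cell's start index to just past the flag.
--     lens = []
--     start = 0
--     for i, x in enumerate(end_of_cell):
--         if x:
--             lens.append(i + 1 - start)
--             start = i + 1
--     return lens
-- ===== Notes on version B (the rewrite author's own statement) =====
-- stated objective: simpler
-- what changed: Replaces A's while-loop of repeated list.index(True, begin) searches (plus running asserts) by a single enumerate pass tracking the current cell's start; Pre_ excludes the inputs where A raises (empty list: AssertionError; last element not True: ValueError from list.index).
import Mathlib
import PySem

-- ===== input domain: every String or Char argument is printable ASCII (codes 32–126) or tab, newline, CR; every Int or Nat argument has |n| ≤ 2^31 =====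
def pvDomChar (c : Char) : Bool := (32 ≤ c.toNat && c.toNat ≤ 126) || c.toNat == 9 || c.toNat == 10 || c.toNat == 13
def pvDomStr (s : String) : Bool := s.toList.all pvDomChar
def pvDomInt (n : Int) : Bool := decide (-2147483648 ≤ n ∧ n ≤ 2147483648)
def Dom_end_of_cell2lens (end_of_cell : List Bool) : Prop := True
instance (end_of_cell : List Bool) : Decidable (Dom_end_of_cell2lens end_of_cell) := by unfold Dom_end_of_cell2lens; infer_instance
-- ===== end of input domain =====

-- B replaces A's repeated list.index(True, begin) searches by one enumerate pass
-- keeping the current cell's start index; return values agree wherever A returns.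

-- ===== PORT A =====
-- Python's end_of_cell.index(True, begin) == begin + (index of True in end_of_cell[begin:]);
-- exact: PySem.List.index? on the dropped suffix, offset by begin.
def eocLoop (l : List Bool) (b : Nat) : List Int :=
  if _h : b < l.length then
    match PySem.List.index? (l.drop b) true with
    | none => []  -- list.index raises ValueError here: outside Pre_
    | some j =>
      let e := b + j + 1
      ((e : Int) - (b : Int)) :: eocLoop l e
  else []
termination_by l.length - b
decreasing_by omega

def end_of_cell2lens (end_of_cell : List Bool) : List Int :=
  eocLoop end_of_cell 0

-- ===== PORT B =====
def end_of_cell2lens_alt (end_of_cell : List Bool) : List Int :=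
  ((PySem.List.enumerate end_of_cell 0).foldl
    (fun (st : Int × List Int) p =>
      if p.2 then (p.1 + 1, st.2 ++ [p.1 + 1 - st.1]) else st)
    (0, [])).2

-- ===== PRECONDITION & SPEC =====
-- Pre_ excludes exactly the inputs where A raises: the empty list (assert N fails,
-- AssertionError) and lists whose last element is not True (list.index raises ValueError).
def Pre_end_of_cell2lens (end_of_cell : List Bool) : Prop :=
  end_of_cell.getLast? = some true
instance (end_of_cell : List Bool) : Decidable (Pre_end_of_cell2lens end_of_cell) := by
  unfold Pre_end_of_cell2lens; infer_instance
def pvWitness_end_of_cell2lens : List Bool := [false, true, true]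

def Spec_end_of_cell2lens (end_of_cell : List Bool) (out : List Int) : Prop := out = end_of_cell2lens_alt end_of_cell
instance (end_of_cell : List Bool) (out : List Int) : Decidable (Spec_end_of_cell2lens end_of_cell out) := by unfold Spec_end_of_cell2lens; infer_instance

-- ===== CLAIM (what is proved, stated in full; the proofs are below) =====
def Claim_equal_end_of_cell2lens : Prop := ∀ (end_of_cell : List Bool), Dom_end_of_cell2lens end_of_cell → Pre_end_of_cell2lens end_of_cell → Spec_end_of_cell2lens end_of_cell (end_of_cell2lens end_of_cell)

-- ===== LEMMAS AND PROOFS =====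

-- reference shape: cell lengths, `cur` = elements already in the open cell
def segs : List Bool → Int → List Int
  | [], _ => []
  | b :: rest, cur => if b then (cur + 1) :: segs rest 0 else segs rest (cur + 1)

lemma b_fold (xs : List Bool) (s cur : Int) (acc : List Int) :
    ((PySem.List.enumerate xs s).foldl
      (fun (st : Int × List Int) p =>
        if p.2 then (p.1 + 1, st.2 ++ [p.1 + 1 - st.1]) else st)
      (s - cur, acc)).2 = acc ++ segs xs cur := by
  induction xs generalizing s cur acc with
  | nil => simp [segs]
  | cons b rest ih =>
    rw [PySem.List.enumerate_cons]
    cases b with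
    | false =>
      simp only [List.foldl_cons, segs, if_neg (by decide : ¬ (false = true))]
      have : s - cur = s + 1 - (cur + 1) := by ring
      rw [this, ih]
    | true =>
      simp only [List.foldl_cons, segs, if_true]
      have h1 : s + 1 - (s - cur) = cur + 1 := by ring
      rw [h1]
      have h3 := ih (s + 1) 0 (acc ++ [cur + 1])
      simp only [sub_zero] at h3
      rw [h3]
      simp

lemma alt_eq_segs (l : List Bool) : end_of_cell2lens_alt l = segs l 0 := by
  have := b_fold l 0 0 []
  simpa [end_of_cell2lens_alt] using this

lemma segs_of_index? (xs : List Bool) (j : Nat)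
    (h : PySem.List.index? xs true = some j) (cur : Int) :
    segs xs cur = (cur + j + 1) :: segs (xs.drop (j + 1)) 0 := by
  induction xs generalizing j cur with
  | nil => simp [PySem.List.index?] at h
  | cons b rest ih =>
    cases b with
    | true =>
      rw [PySem.List.index?_cons_self] at h
      cases h
      simp [segs]
    | false =>
      rw [PySem.List.index?_cons_of_ne rest (by decide : (false : Bool) ≠ true)] at h
      rcases Option.map_eq_some_iff.mp h with ⟨k, hk, rfl⟩
      have := ih k hk (cur + 1)
      simp only [segs]
      rw [this]
      simp only [Bool.false_eq_true, if_false, List.drop_succ_cons]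
      congr 1
      push_cast; ring

lemma mem_true_drop (l : List Bool) (b : Nat) (hb : b < l.length)
    (hlast : l.getLast? = some true) : true ∈ l.drop b := by
  have hne : l.drop b ≠ [] := by
    intro h
    have := List.drop_eq_nil_iff.mp h
    omega
  have : (l.drop b).getLast? = l.getLast? := by
    rw [List.getLast?_drop]
    simp [Nat.not_le.mpr hb]
  have hmem : true ∈ l.drop b := by
    have := List.getLast?_eq_some_iff.mp (this.trans hlast)
    rcases this with ⟨ys, hys⟩
    rw [hys]; simp
  exact hmem

lemma eocLoop_eq_segs (l : List Bool) (hlast : l.getLast? = some true) :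
    ∀ b, eocLoop l b = segs (l.drop b) 0 := by
  intro b
  induction hn : l.length - b using Nat.strong_induction_on generalizing b with
  | _ n ih =>
  subst hn
  rw [eocLoop]
  by_cases hb : b < l.length
  · rw [dif_pos hb]
    have hmem : true ∈ l.drop b := mem_true_drop l b hb hlast
    rcases Option.isSome_iff_exists.mp ((PySem.List.index?_isSome_iff (l.drop b) true).mpr hmem) with ⟨j, hj⟩
    simp only [hj]
    have hjlt : j + 1 ≤ (l.drop b).length := by
      rcases PySem.List.getElem_of_index?_eq_some hj with ⟨hk, _, _⟩
      omega
    have hrec := ih (l.length - (b + j + 1)) (by simp at hjlt; omega) (b + j + 1) rfl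
    rw [hrec, segs_of_index? _ j hj 0, List.drop_drop]
    congr 1
    push_cast; ring
  · rw [dif_neg hb]
    rw [List.drop_eq_nil_of_le (by omega)]
    simp [segs]

-- ===== VERDICT (by name: the statement is the Claim_ definition above) =====
theorem end_of_cell2lens_spec : Claim_equal_end_of_cell2lens := by
  intro l _ hpre
  unfold Spec_end_of_cell2lens
  rw [alt_eq_segs, end_of_cell2lens, eocLoop_eq_segs l hpre 0, List.drop_zero]
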